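-- pv_equiv track=rewrite | github.com/zhang-man-mc/c2c | fugitive_dust/get_page/addess_function.py | filter_time_list
-- ===== SOURCE A (Python) =====
-- def filter_time_list(time_list:list, value:str)->list:
--     # 只保留value时间后的数据。给定的时间小于第一个值，就直接返回。大于所有的值时，返回空列表
--     result = []
--
--     # 如果给定的时间小于第一个值，就直接返回（前提是time_list升序排列）
--     if value < time_list[0]['LST']:
--         return time_list
--
--     found = False
--
--     for item in time_list:
--         if found:
--             result.append(item)
--
--         if item['LST'] == value:
--             found = True
--
--     return result
-- ===== SOURCE B (Python) =====
-- def filter_time_list(time_list: list, value: str) -> list: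
--     # Recursive decomposition: peel items until the first 'LST' match, return the rest.
--     if value < time_list[0]['LST']:
--         return time_list
--
--     def after(rest):
--         if not rest:
--             return []
--         head, tail = rest[0], rest[1:]
--         if head['LST'] == value:
--             return tail
--         return after(tail)
--
--     return after(time_list)
-- ===== Notes on version B (the rewrite author's own statement) =====
-- stated objective: simpler
-- what changed: B recursively peels items off the front until the first 'LST' match and returns the remaining tail directly, instead of A's single loop threading a found-flag and appending each later item to an accumulator.
import Mathlib
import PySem

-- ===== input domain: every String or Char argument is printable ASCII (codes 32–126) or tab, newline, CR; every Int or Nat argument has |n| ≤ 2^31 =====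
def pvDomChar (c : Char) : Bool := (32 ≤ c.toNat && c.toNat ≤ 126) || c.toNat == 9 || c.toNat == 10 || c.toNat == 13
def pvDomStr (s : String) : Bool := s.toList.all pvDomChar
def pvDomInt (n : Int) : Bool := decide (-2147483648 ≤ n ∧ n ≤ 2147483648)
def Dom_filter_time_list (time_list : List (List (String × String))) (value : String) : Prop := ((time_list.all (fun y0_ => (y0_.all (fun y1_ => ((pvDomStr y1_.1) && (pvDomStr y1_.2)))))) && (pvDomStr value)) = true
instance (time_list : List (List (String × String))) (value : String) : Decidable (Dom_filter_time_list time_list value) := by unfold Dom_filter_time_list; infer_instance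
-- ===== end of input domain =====

-- B replaces A's found-flag accumulation loop by a recursive peel-until-first-match returning the tail; equivalence of RETURN values proved on Pre_ (A raises KeyError/IndexError outside it).


-- Python str "<" is code-point lexicographic = Lean "<" on .toList (exact per PYSEM).
-- item['LST'] (Python dict built from the pair list; later duplicate keys overwrite)
def lookupLST (item : List (String × String)) : Option String :=
  (PySem.Dict.ofList item).get? "LST"

-- ===== PORT A =====
def filter_time_list (time_list : List (List (String × String))) (value : String) : List (List (String × String)) :=
  match time_list with
  | [] => []  -- Python raises IndexError here; excluded by Pre_
  | h :: _ =>
    if value.toList < ((lookupLST h).getD "").toList then time_list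
    else
      (time_list.foldl
        (fun (st : List (List (String × String)) × Bool) item =>
          let result := if st.2 then st.1 ++ [item] else st.1
          let found := if (lookupLST item).getD "" == value then true else st.2
          (result, found))
        ([], false)).1

-- ===== PORT B =====
-- B's inner helper `after`: drop elements until the first 'LST' match, answer is the tail.
def afterLST (value : String) : List (List (String × String)) → List (List (String × String))
  | [] => []
  | head :: tail =>
    if (lookupLST head).getD "" == value then tail else afterLST value tail

def filter_time_list_alt (time_list : List (List (String × String))) (value : String) : List (List (String × String)) :=
  match time_list with
  | [] => []  -- Python raises IndexError here; excluded by Pre_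
  | h :: _ =>
    if value.toList < ((lookupLST h).getD "").toList then time_list
    else afterLST value time_list

-- ===== PRECONDITION & SPEC =====
-- Exactly where Python A returns: the list is nonempty, its first item has key 'LST'
-- (else IndexError/KeyError), and if the loop is reached every item has key 'LST'.
def Pre_filter_time_list (time_list : List (List (String × String))) (value : String) : Prop :=
  time_list ≠ [] ∧ (lookupLST (time_list.headD [])).isSome ∧
    (¬ value.toList < ((lookupLST (time_list.headD [])).getD "").toList →
      ∀ item ∈ time_list, (lookupLST item).isSome)
instance (time_list : List (List (String × String))) (value : String) : Decidable (Pre_filter_time_list time_list value) := by unfold Pre_filter_time_list; infer_instance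

def pvWitness_filter_time_list : (List (List (String × String))) × String := ([[("LST", "a")], [("LST", "b")]], "a")

def Spec_filter_time_list (time_list : List (List (String × String))) (value : String) (out : List (List (String × String))) : Prop := out = filter_time_list_alt time_list value
instance (time_list : List (List (String × String))) (value : String) (out : List (List (String × String))) : Decidable (Spec_filter_time_list time_list value out) := by unfold Spec_filter_time_list; infer_instance

-- ===== CLAIM (what is proved, stated in full; the proofs are below) =====
def Claim_equal_filter_time_list : Prop := ∀ (time_list : List (List (String × String))) (value : String), Dom_filter_time_list time_list value → Pre_filter_time_list time_list value → Spec_filter_time_list time_list value (filter_time_list time_list value)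

-- ===== LEMMAS AND PROOFS =====

-- A's loop step, abstracted over the match test p.
def stepA (p : List (String × String) → Bool)
    (st : List (List (String × String)) × Bool) (item : List (String × String)) :
    List (List (String × String)) × Bool :=
  (if st.2 then st.1 ++ [item] else st.1, if p item then true else st.2)

-- Once found, the loop appends everything that remains.
theorem foldl_stepA_found (p : List (String × String) → Bool)
    (l : List (List (String × String))) (acc : List (List (String × String))) :
    (l.foldl (stepA p) (acc, true)).1 = acc ++ l := by
  induction l generalizing acc with
  | nil => simp
  | cons h t ih => simp [stepA, ih (acc ++ [h])]

-- Before the first match the accumulator stays []; the result is the tail after the first match.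
theorem foldl_stepA_eq_afterLST (value : String)
    (l : List (List (String × String))) :
    (l.foldl (stepA (fun item => (lookupLST item).getD "" == value)) ([], false)).1 =
      afterLST value l := by
  induction l with
  | nil => rfl
  | cons h t ih =>
    by_cases hp : (lookupLST h).getD "" == value
    · simp [stepA, hp, afterLST, foldl_stepA_found _ t []]
    · simp only [List.foldl_cons, stepA, hp, Bool.false_eq_true, if_false, afterLST]
      exact ih

-- ===== VERDICT (by name: the statement is the Claim_ definition above) =====
theorem filter_time_list_spec : Claim_equal_filter_time_list := by
  intro time_list value _ _
  unfold Spec_filter_time_list filter_time_list filter_time_list_alt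
  cases time_list with
  | nil => rfl
  | cons h t =>
    by_cases hlt : value.toList < ((lookupLST h).getD "").toList
    · simp [hlt]
    · simp only [hlt, if_false]
      exact foldl_stepA_eq_afterLST value (h :: t)
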